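-- pv_equiv track=rewrite | github.com/minhchauU23/PythonCodePtit | PY01027_so_loc_phat_dep.py | isGreatNumber
-- ===== SOURCE A (Python) =====
-- def isGreatNumber(num):
--     for index in range(len(num)):
--         if num[index] == "8":
--             if index == 0: return False
--             elif index == 1:
--                 if num[index - 1] == "8": return False
--             else:
--                 if num[index - 1] == "8" and num[index - 2] == "8":
--                     return False
--         elif num[index] != "6": return False
--     return True
-- ===== SOURCE B (Python) =====
-- def isGreatNumber(num):
--     return (all(c == "6" or c == "8" for c in num)
--             and not num.startswith("8")
--             and "888" not in num)
-- ===== Notes on version B (the rewrite author's own statement) =====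
-- stated objective: simpler
-- what changed: Replaced the stateful index loop with per-index two-character lookback by three independent declarative checks: all characters in {6,8}, no leading '8', and no '888' substring (library search).
import Mathlib
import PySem

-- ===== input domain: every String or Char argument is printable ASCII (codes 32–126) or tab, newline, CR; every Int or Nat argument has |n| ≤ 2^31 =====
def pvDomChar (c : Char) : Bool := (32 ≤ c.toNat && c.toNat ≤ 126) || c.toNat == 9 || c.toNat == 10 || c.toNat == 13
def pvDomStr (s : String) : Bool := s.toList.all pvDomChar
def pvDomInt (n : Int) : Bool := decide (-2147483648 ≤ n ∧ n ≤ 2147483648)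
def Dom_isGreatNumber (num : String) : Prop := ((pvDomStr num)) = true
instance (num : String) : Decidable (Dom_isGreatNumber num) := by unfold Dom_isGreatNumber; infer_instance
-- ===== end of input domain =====

-- B replaces A's stateful index loop (per-index two-character lookback) by three independent
-- declarative checks: all chars in {'6','8'}, no leading '8', no "888" substring. Same cost, simpler.

-- ===== PORT A =====
-- the index loop 'for index in range(len(num))' of A, with its early returns
def isGreatNumberGo (s : List Char) (i : Nat) : Bool :=
  if h : i < s.length then
    if s[i] == '8' then
      if i == 0 then false
      else if i == 1 then
        if s[i-1]! == '8' then false else isGreatNumberGo s (i+1)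
      else
        if s[i-1]! == '8' && s[i-2]! == '8' then false
        else isGreatNumberGo s (i+1)
    else if s[i] != '6' then false
    else isGreatNumberGo s (i+1)
  else true
  termination_by s.length - i

def isGreatNumber (num : String) : Bool := isGreatNumberGo num.toList 0

-- ===== PORT B =====
def isGreatNumber_alt (num : String) : Bool :=
  num.toList.all (fun c => c == '6' || c == '8')
    && !(PySem.Str.startswith num "8")
    && !(PySem.Str.isIn "888" num)

-- ===== PRECONDITION & SPEC =====
def Spec_isGreatNumber (num : String) (out : Bool) : Prop := out = isGreatNumber_alt num
instance (num : String) (out : Bool) : Decidable (Spec_isGreatNumber num out) := by unfold Spec_isGreatNumber; infer_instance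

-- ===== CLAIM (what is proved, stated in full; the proofs are below) =====
def Claim_equal_isGreatNumber : Prop := ∀ (num : String), Dom_isGreatNumber num → Spec_isGreatNumber num (isGreatNumber num)

-- ===== LEMMAS AND PROOFS =====

-- the per-index condition A checks (truncated Nat subtraction makes the i=0 and i=1 branches uniform)
def OkAt (s : List Char) (j : Nat) : Prop :=
  match s[j]? with
  | none => True
  | some c => if c = '8' then ¬ (s[j-1]? = some '8' ∧ s[j-2]? = some '8') else c = '6'

theorem okAt_some {s : List Char} {j : Nat} {c : Char} (hj : s[j]? = some c) :
    OkAt s j ↔ (if c = '8' then ¬ (s[j-1]? = some '8' ∧ s[j-2]? = some '8') else c = '6') := by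
  unfold OkAt; rw [hj]

theorem goA_iff (s : List Char) (i : Nat) :
    isGreatNumberGo s i = true ↔ ∀ j, i ≤ j → OkAt s j := by
  have H : ∀ n i, s.length - i = n → (isGreatNumberGo s i = true ↔ ∀ j, i ≤ j → OkAt s j) := by
    intro n
    induction n with
    | zero =>
      intro i hi
      have hlen : s.length ≤ i := by omega
      unfold isGreatNumberGo
      simp only [Nat.not_lt.mpr hlen]
      constructor
      · intro _ j hj
        unfold OkAt
        rw [List.getElem?_eq_none (by omega)]
        trivial
      · intro _; rfl
    | succ n ih =>
      intro i hi
      have h : i < s.length := by omega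
      have hsplit : (∀ j, i ≤ j → OkAt s j) ↔ (OkAt s i ∧ ∀ j, i+1 ≤ j → OkAt s j) :=
        ⟨fun hh => ⟨hh i le_rfl, fun j hj => hh j (by omega)⟩,
         fun ⟨h0, h1⟩ j hj => by
           by_cases hji : j = i
           · exact hji ▸ h0
           · exact h1 j (by omega)⟩
      have ihs := ih (i+1) (by omega)
      rw [hsplit, okAt_some (List.getElem?_eq_getElem h)]
      unfold isGreatNumberGo
      rw [dif_pos h]
      by_cases h8 : s[i] = '8'
      · simp only [h8, beq_self_eq_true, if_true]
        by_cases hi0 : i = 0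
        · subst hi0
          simp [List.getElem?_eq_getElem h, h8]
        · by_cases hi1 : i = 1
          · subst hi1
            have h0lt : 0 < s.length := by omega
            have hb : s[(1:Nat)-1]! = s[0] := by
              simp [List.getElem!_eq_getElem?_getD, List.getElem?_eq_getElem h0lt]
            simp only [if_neg (by decide : ¬ (((1:Nat) == 0) = true)), if_pos rfl, hb]
            by_cases h08 : s[0] = '8'
            · simp [h08, List.getElem?_eq_getElem h0lt]
            · simp only [beq_iff_eq, h08, if_neg h08, if_false]
              simpa [List.getElem?_eq_getElem h0lt, h08] using ihs
          · have hge : 2 ≤ i := by omega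
            have h1lt : i - 1 < s.length := by omega
            have h2lt : i - 2 < s.length := by omega
            have hb1 : s[i-1]! = s[i-1] := by
              simp [List.getElem!_eq_getElem?_getD, List.getElem?_eq_getElem h1lt]
            have hb2 : s[i-2]! = s[i-2] := by
              simp [List.getElem!_eq_getElem?_getD, List.getElem?_eq_getElem h2lt]
            have e0 : (i == 0) = false := by simp [hi0]
            have e1 : (i == 1) = false := by simp [hi1]
            simp only [e0, e1, Bool.false_eq_true, if_false, hb1, hb2]
            by_cases hc : s[i-1] = '8' ∧ s[i-2] = '8'
            · simp [hc.1, hc.2, List.getElem?_eq_getElem h1lt, List.getElem?_eq_getElem h2lt]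
            · have hb : (s[i-1] == '8' && s[i-2] == '8') = false := by
                rcases Decidable.not_and_iff_or_not.mp hc with hx | hx <;> simp [hx]
              rw [hb]
              simp only [Bool.false_eq_true, if_false, ihs]
              have : ¬ (s[i-1]? = some '8' ∧ s[i-2]? = some '8') := by
                simp [List.getElem?_eq_getElem h1lt, List.getElem?_eq_getElem h2lt]
                intro a b; exact hc ⟨a, b⟩
              simp [this]
      · simp only [if_neg h8, beq_iff_eq, if_neg h8]
        by_cases h6 : s[i] = '6'
        · simp [h6, ihs]
        · simp [h6, bne_iff_ne, Ne, ihs]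
  exact H _ i rfl

theorem prefix888_iff (t : List Char) :
    ['8','8','8'] <+: t ↔ (t[0]? = some '8' ∧ t[1]? = some '8' ∧ t[2]? = some '8') := by
  rcases t with _|⟨a,_|⟨b,_|⟨c,rest⟩⟩⟩
  · simp
  · simp [List.cons_prefix_cons]
  · simp [List.cons_prefix_cons]
  · simp [List.cons_prefix_cons, and_assoc, eq_comm (a := '8')]

theorem isIn888_iff (s : List Char) :
    PySem.Chars.isIn ['8','8','8'] s = true ↔
      ∃ j, s[j]? = some '8' ∧ s[j+1]? = some '8' ∧ s[j+2]? = some '8' := by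
  rw [← PySem.Chars.exists_prefix_drop_iff_isIn]
  refine exists_congr fun j => ?_
  rw [prefix888_iff]
  simp [List.getElem?_drop]

theorem startswith8_iff (s : List Char) :
    PySem.Chars.startswith s ['8'] = true ↔ s[0]? = some '8' := by
  rw [PySem.Chars.startswith_iff]
  rcases s with _|⟨a,t⟩ <;> simp [List.cons_prefix_cons, eq_comm]

theorem okAt_iff (s : List Char) :
    (∀ j, OkAt s j) ↔
      ((∀ c ∈ s, c = '6' ∨ c = '8') ∧ s[0]? ≠ some '8' ∧
        ¬ ∃ j, s[j]? = some '8' ∧ s[j+1]? = some '8' ∧ s[j+2]? = some '8') := by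
  constructor
  · intro h
    refine ⟨?_, ?_, ?_⟩
    · intro c hc
      obtain ⟨j, hj, rfl⟩ := List.mem_iff_getElem.mp hc
      have hk := (okAt_some (List.getElem?_eq_getElem hj)).mp (h j)
      by_cases h8 : s[j] = '8'
      · exact Or.inr h8
      · rw [if_neg h8] at hk; exact Or.inl hk
    · intro h0
      have hk := (okAt_some h0).mp (h 0)
      simp at hk
      exact hk h0
    · rintro ⟨j, h1, h2, h3⟩
      have hk := (okAt_some h3).mp (h (j+2))
      simp only [if_pos rfl, Nat.add_sub_cancel] at hk
      have e1 : j + 2 - 1 = j + 1 := by omega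
      rw [e1] at hk
      exact hk ⟨h2, h1⟩
  · rintro ⟨hall, hhead, h888⟩ j
    cases hj : s[j]? with
    | none => unfold OkAt; rw [hj]; trivial
    | some c =>
      rw [okAt_some hj]
      have hc : c ∈ s := List.mem_of_getElem? hj
      by_cases h8 : c = '8'
      · subst h8
        rw [if_pos rfl]
        rintro ⟨ha, hb⟩
        rcases Nat.lt_or_ge j 2 with hj2 | hj2
        · interval_cases j
          · exact hhead hj
          · exact hhead ha
        · refine h888 ⟨j-2, ?_, ?_, ?_⟩
          · exact hb
          · rwa [show j-2+1 = j-1 by omega]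
          · rwa [show j-2+2 = j by omega]
      · rw [if_neg h8]
        rcases hall c hc with h6 | h8'
        · exact h6
        · exact absurd h8' h8

theorem alt_iff (num : String) :
    isGreatNumber_alt num = true ↔
      ((∀ c ∈ num.toList, c = '6' ∨ c = '8') ∧ num.toList[0]? ≠ some '8' ∧
        ¬ ∃ j, num.toList[j]? = some '8' ∧ num.toList[j+1]? = some '8' ∧ num.toList[j+2]? = some '8') := by
  unfold isGreatNumber_alt
  simp only [Bool.and_eq_true, Bool.not_eq_true', List.all_eq_true]
  constructor
  · rintro ⟨⟨hall, hsw⟩, hin⟩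
    refine ⟨fun c hc => by simpa using hall c hc, ?_, ?_⟩
    · intro h0
      have := (startswith8_iff num.toList).mpr h0
      simp at this hsw
      rw [this] at hsw
      exact absurd hsw (by simp)
    · intro hex
      have := (isIn888_iff num.toList).mpr hex
      simp at this hin
      rw [this] at hin
      exact absurd hin (by simp)
  · rintro ⟨hall, hhead, h888⟩
    refine ⟨⟨fun c hc => by simpa using hall c hc, ?_⟩, ?_⟩
    · by_contra hsw
      simp only [Bool.not_eq_false] at hsw
      simp at hsw
      exact hhead ((startswith8_iff num.toList).mp hsw)
    · by_contra hin
      simp only [Bool.not_eq_false] at hin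
      simp at hin
      exact h888 ((isIn888_iff num.toList).mp hin)

-- ===== VERDICT (by name: the statement is the Claim_ definition above) =====
theorem isGreatNumber_spec : Claim_equal_isGreatNumber := by
  intro num _
  unfold Spec_isGreatNumber isGreatNumber
  rw [Bool.eq_iff_iff, goA_iff, alt_iff]
  constructor
  · intro h; exact (okAt_iff _).mp (fun j => h j (Nat.zero_le j))
  · intro h j _; exact (okAt_iff _).mpr h j
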